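-- pv_equiv track=rewrite | github.com/avinpereira/code-forces | wrong_subtraction.py | wrong_subtraction
-- ===== SOURCE A (Python) =====
-- def wrong_subtraction(n,k):
--     # import pdb; pdb.set_trace()
--     i = 0
--     result = n
--     while (i < k):
--         if result % 10 == 0:
--             result = result / 10
--         else:
--             result = result - 1
--         i+=1
--     return int(result)
-- ===== SOURCE B (Python) =====
-- def wrong_subtraction(n, k):
--     # Batch runs of "-1" steps: from a non-multiple of 10 the next
--     # (result % 10) operations are all subtractions, so take them at once.
--     result = n
--     rem = k
--     while rem > 0:
--         if result == 0:
--             break  # 0 is a fixed point (0 % 10 == 0 and 0 / 10 == 0)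
--         d = result % 10
--         if d == 0:
--             result //= 10
--             rem -= 1
--         else:
--             t = min(d, rem)
--             result -= t
--             rem -= t
--     return result
-- ===== Notes on version B (the rewrite author's own statement) =====
-- stated objective: faster
-- what changed: Instead of applying each of the k operations one at a time, B batches every maximal run of -1 steps into a single subtraction of min(last_digit, remaining), and stops early at the fixed point 0.
import Mathlib
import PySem

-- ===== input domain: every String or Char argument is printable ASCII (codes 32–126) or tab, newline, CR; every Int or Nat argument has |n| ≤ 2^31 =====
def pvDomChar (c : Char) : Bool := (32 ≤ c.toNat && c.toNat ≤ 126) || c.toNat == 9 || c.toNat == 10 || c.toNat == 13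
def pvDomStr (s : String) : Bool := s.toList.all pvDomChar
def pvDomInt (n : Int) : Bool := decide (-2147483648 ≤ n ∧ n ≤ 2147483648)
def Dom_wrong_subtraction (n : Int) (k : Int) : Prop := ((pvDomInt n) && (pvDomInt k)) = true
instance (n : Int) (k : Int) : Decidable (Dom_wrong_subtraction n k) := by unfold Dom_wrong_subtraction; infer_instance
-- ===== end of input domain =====

-- B batches maximal runs of "-1" steps into one subtraction (and stops at the fixed point 0)
-- instead of A's one-operation-per-iteration loop; return value only, A mutates nothing.
-- Note on A's `result / 10`: Python true division, but it is taken only when result is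
-- divisible by 10 and |result| ≤ 2^31 + 9 throughout, so the float value is the exact
-- integer quotient; the port uses integer floor division, which is equal there.

-- ===== PORT A =====
-- the while loop of A: one operation per unit of fuel (fuel = max(k,0), the number of iterations)
def wrongSubLoopA (result : Int) (fuel : Nat) : Int :=
  match fuel with
  | 0 => result
  | Nat.succ f =>
      wrongSubLoopA (if PySem.Int.mod result 10 = 0 then PySem.Int.floordiv result 10
                     else result - 1) f

def wrong_subtraction (n : Int) (k : Int) : Int := wrongSubLoopA n k.toNat

-- ===== PORT B =====
def wrongSubLoopB (result : Int) (rem : Int) : Int :=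
  if _h : rem ≤ 0 then result
  else if result = 0 then result
  else
    let d := PySem.Int.mod result 10
    if d = 0 then wrongSubLoopB (PySem.Int.floordiv result 10) (rem - 1)
    else wrongSubLoopB (result - min d rem) (rem - min d rem)
termination_by rem.toNat
decreasing_by
  · omega
  · have hd : 0 < PySem.Int.mod result 10 := by
      have := PySem.Int.mod_eq_emod_of_pos (a := result) (b := 10) (by omega)
      omega
    have h1 : (1:Int) ≤ min (PySem.Int.mod result 10) rem := by
      simp only [le_min_iff]; omega
    omega

def wrong_subtraction_alt (n : Int) (k : Int) : Int := wrongSubLoopB n k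

-- ===== PRECONDITION & SPEC =====
def Spec_wrong_subtraction (n : Int) (k : Int) (out : Int) : Prop := out = wrong_subtraction_alt n k
instance (n : Int) (k : Int) (out : Int) : Decidable (Spec_wrong_subtraction n k out) := by unfold Spec_wrong_subtraction; infer_instance

-- ===== CLAIM (what is proved, stated in full; the proofs are below) =====
def Claim_equal_wrong_subtraction : Prop := ∀ (n : Int) (k : Int), Dom_wrong_subtraction n k → Spec_wrong_subtraction n k (wrong_subtraction n k)

-- ===== LEMMAS AND PROOFS =====

-- A's mod/div with the positive literal divisor 10 are Lean's emod/ediv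
lemma mod10 (a : Int) : PySem.Int.mod a 10 = a % 10 :=
  PySem.Int.mod_eq_emod_of_pos (by omega)

lemma div10 (a : Int) : PySem.Int.floordiv a 10 = a / 10 :=
  PySem.Int.floordiv_eq_ediv_of_pos (by omega)

-- 0 is a fixed point of A's loop
lemma loopA_zero (f : Nat) : wrongSubLoopA 0 f = 0 := by
  induction f with
  | zero => rfl
  | succ f ih => simpa [wrongSubLoopA, mod10, div10] using ih

-- batching t consecutive "-1" steps of A, valid while t ≤ result % 10
lemma loopA_batch (t : Nat) : ∀ (result : Int) (f : Nat),
    (t : Int) ≤ result % 10 → t ≤ f →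
    wrongSubLoopA result f = wrongSubLoopA (result - t) (f - t) := by
  induction t with
  | zero => intro result f _ _; simp
  | succ t ih =>
      intro result f ht hf
      have hm : 0 ≤ result % 10 ∧ result % 10 < 10 := ⟨Int.emod_nonneg _ (by omega), Int.emod_lt_of_pos _ (by omega)⟩
      have hne : PySem.Int.mod result 10 ≠ 0 := by rw [mod10]; push_cast at ht; omega
      obtain ⟨f', rfl⟩ : ∃ f', f = f' + 1 := ⟨f - 1, by omega⟩
      have hstep : wrongSubLoopA result (f' + 1) = wrongSubLoopA (result - 1) f' := by
        simp only [wrongSubLoopA, if_neg hne]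
      rw [hstep]
      have hmod : (result - 1) % 10 = result % 10 - 1 := by omega
      have := ih (result - 1) f' (by rw [hmod]; push_cast at ht ⊢; omega) (by omega)
      rw [this]
      congr 1
      · push_cast; ring
      · omega

-- main invariant: B's batched loop computes A's loop with fuel rem.toNat
lemma loop_eq : ∀ (fuel : Nat) (result rem : Int), rem.toNat = fuel →
    wrongSubLoopB result rem = wrongSubLoopA result fuel := by
  intro fuel
  induction fuel using Nat.strong_induction_on with
  | _ fuel ih =>
    intro result rem hfuel
    by_cases hr : rem ≤ 0
    · have : fuel = 0 := by omega
      subst this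
      rw [wrongSubLoopB]; simp [hr, wrongSubLoopA]
    · have hfp : 0 < fuel := by omega
      by_cases h0 : result = 0
      · subst h0
        rw [wrongSubLoopB]; simp [dif_neg hr, loopA_zero]
      · by_cases hd : PySem.Int.mod result 10 = 0
        · rw [wrongSubLoopB]
          simp only [dif_neg hr, if_neg h0, if_pos hd]
          obtain ⟨f', rfl⟩ : ∃ f', fuel = f' + 1 := ⟨fuel - 1, by omega⟩
          rw [ih f' (by omega) _ (rem - 1) (by omega)]
          simp only [wrongSubLoopA, if_pos hd]
        · have hdpos : 0 < result % 10 := by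
            have := Int.emod_nonneg result (show (10:Int) ≠ 0 by omega)
            rw [mod10] at hd; omega
          have hdlt : result % 10 < 10 := Int.emod_lt_of_pos _ (by omega)
          set t : Int := min (PySem.Int.mod result 10) rem with htdef
          have ht1 : 1 ≤ t := by rw [htdef, mod10]; simp only [le_min_iff]; omega
          have htd : t ≤ result % 10 := by rw [htdef, mod10]; exact min_le_left _ _
          have htr : t ≤ rem := min_le_right _ _
          rw [wrongSubLoopB]
          simp only [dif_neg hr, if_neg h0, if_neg hd, ← htdef]
          rw [ih (fuel - t.toNat) (by omega) _ (rem - t) (by omega)]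
          have hbatch := loopA_batch t.toNat result fuel
            (by rw [Int.toNat_of_nonneg (by omega)]; exact htd) (by omega)
          rw [hbatch, Int.toNat_of_nonneg (show (0:Int) ≤ t by omega)]
  -- done

-- ===== VERDICT (by name: the statement is the Claim_ definition above) =====
theorem wrong_subtraction_spec : Claim_equal_wrong_subtraction := by
  intro n k _
  unfold Spec_wrong_subtraction wrong_subtraction wrong_subtraction_alt
  exact (loop_eq k.toNat n k rfl).symm
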